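-- pv_equiv track=rewrite | github.com/DIDSR/DART | DART/HDCmanager.py | determine_matching
-- ===== SOURCE A (Python) =====
-- def remove_inherent(values:dict, inherent):
--     return {k:v for (k,v) in values.items() if k not in inherent}
--
-- def determine_matching(criteria1, criteria2, group1, group2):
--     """ Determine which of the subgroups are matching and for which the equivalent are missing """
--     #TODO: work with all numeric operators (>, <, <=, >=)
--     atts1 = [c.split("=")[0] for c in criteria1]
--     atts2 = [c.split("=")[0] for c in criteria2]
--     #extract the non-user-specified portion of the subgroups found
--     sub1 = {k:remove_inherent(v, atts1) for (k,v) in group1.items()}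
--     sub2 = {k:remove_inherent(v, atts2) for (k,v) in group2.items()}
--     # see which of the subgroups are represented in both specified populations and get the equivalent subgroup's id
--     pairs = []
--     for k in sub1:
--         corresponding = list(filter(lambda x: sub2[x] == sub1[k], sub2))
--         if len(corresponding) == 1:
--             k2 = corresponding[0]
--             pairs.append((k,k2))
--
--     return pairs
-- ===== SOURCE B (Python) =====
-- def determine_matching(criteria1, criteria2, group1, group2):
--     """ Determine which of the subgroups are matching and for which the equivalent are missing """
--     atts1 = {c.split("=")[0] for c in criteria1}
--     atts2 = {c.split("=")[0] for c in criteria2}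
--     # canonical key of a subgroup = its non-specified items, sorted by attribute name
--     keyed = [(tuple(sorted(((a, b) for (a, b) in v.items() if a not in atts2),
--                            key=lambda p: p[0])), k2)
--              for (k2, v) in group2.items()]
--     buckets = {}
--     for key, k2 in keyed:
--         buckets.setdefault(key, []).append(k2)
--     pairs = []
--     for k, v in group1.items():
--         key = tuple(sorted(((a, b) for (a, b) in v.items() if a not in atts1),
--                            key=lambda p: p[0]))
--         ms = buckets.get(key, [])
--         if len(ms) == 1:
--             pairs.append((k, ms[0]))
--     return pairs
-- ===== Notes on version B (the rewrite author's own statement) =====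
-- stated objective: faster
-- what changed: Instead of scanning all of group2 for every group1 subgroup with order-insensitive dict comparison, B builds in one pass a bucket index of group2 keyed by a canonical (attribute-sorted) tuple of the non-specified items and answers each group1 subgroup by a single lookup.
import Mathlib
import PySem

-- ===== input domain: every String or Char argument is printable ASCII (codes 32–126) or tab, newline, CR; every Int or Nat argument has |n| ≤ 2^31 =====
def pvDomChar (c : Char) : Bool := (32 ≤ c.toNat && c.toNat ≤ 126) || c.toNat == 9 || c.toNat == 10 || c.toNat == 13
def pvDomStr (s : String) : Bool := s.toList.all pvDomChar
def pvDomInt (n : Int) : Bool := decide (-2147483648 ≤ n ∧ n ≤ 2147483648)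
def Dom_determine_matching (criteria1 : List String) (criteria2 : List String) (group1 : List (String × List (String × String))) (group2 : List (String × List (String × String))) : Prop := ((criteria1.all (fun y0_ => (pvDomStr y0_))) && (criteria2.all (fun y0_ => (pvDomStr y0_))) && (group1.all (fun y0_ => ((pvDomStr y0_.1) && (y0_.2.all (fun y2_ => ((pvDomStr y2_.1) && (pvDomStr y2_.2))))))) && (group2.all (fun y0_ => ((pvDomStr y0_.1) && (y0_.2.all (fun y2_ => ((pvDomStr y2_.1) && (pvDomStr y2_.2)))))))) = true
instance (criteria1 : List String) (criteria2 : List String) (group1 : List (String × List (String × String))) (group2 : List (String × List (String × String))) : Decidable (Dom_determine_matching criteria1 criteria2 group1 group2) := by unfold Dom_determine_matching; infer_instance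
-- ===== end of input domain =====

-- B replaces A's scan of all of group2 for every group1 subgroup by a one-pass bucket index of
-- group2 under a canonical (name-sorted) key of the non-specified items; objective: faster.

-- ===== PORT A =====
-- shared input decoding: Python receives group1/group2 as dicts of dicts built from the
-- association lists (later duplicate keys overwrite, keys keep their first position)
def pvToGroup (g : List (String × List (String × String))) : PySem.Dict String (PySem.Dict String String) :=
  PySem.Dict.ofList (g.map (fun p => (p.1, PySem.Dict.ofList p.2)))

-- c.split("=")[0]  (split on a nonempty separator always yields a nonempty list, so headD is exact)
def pvSplitHead (c : String) : String := ((PySem.Str.split? c "=").getD []).headD ""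

def remove_inherent (values : PySem.Dict String String) (inherent : List String) : PySem.Dict String String :=
  values.items.foldl (fun d p => if p.1 ∈ inherent then d else d.insert p.1 p.2) PySem.Dict.empty

-- Python's order-insensitive dict equality sub2[x] == sub1[k]
def pvDictEq (d1 d2 : PySem.Dict String String) : Bool :=
  d1.size == d2.size && d1.items.all (fun q => d2.get? q.1 == some q.2)

def determine_matching (criteria1 : List String) (criteria2 : List String) (group1 : List (String × List (String × String))) (group2 : List (String × List (String × String))) : List (String × String) :=
  let atts1 := criteria1.map pvSplitHead
  let atts2 := criteria2.map pvSplitHead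
  let sub1 := (pvToGroup group1).items.foldl (fun d p => d.insert p.1 (remove_inherent p.2 atts1)) PySem.Dict.empty
  let sub2 := (pvToGroup group2).items.foldl (fun d p => d.insert p.1 (remove_inherent p.2 atts2)) PySem.Dict.empty
  -- sub1[k] / sub2[x] always succeed (k, x are keys), so getD with a dummy default is exact
  sub1.keys.foldl (fun pairs k =>
    let corresponding := sub2.keys.filter (fun x => pvDictEq (sub2.getD x PySem.Dict.empty) (sub1.getD k PySem.Dict.empty))
    if corresponding.length == 1 then pairs ++ [(k, corresponding.headD "")] else pairs) []

-- ===== PORT B =====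
-- canonical key of a subgroup: its non-specified items sorted by attribute name
def pvCanon (items : List (String × String)) (atts : PySem.Set String) : List (String × String) :=
  PySem.List.sorted (items.filter (fun q => !PySem.Set.contains atts q.1)) (fun q => q.1) false

def determine_matching_alt (criteria1 : List String) (criteria2 : List String) (group1 : List (String × List (String × String))) (group2 : List (String × List (String × String))) : List (String × String) :=
  let atts1 := PySem.Set.ofList (criteria1.map pvSplitHead)
  let atts2 := PySem.Set.ofList (criteria2.map pvSplitHead)
  let keyed := (pvToGroup group2).items.map (fun p => (pvCanon p.2.items atts2, p.1))
  let buckets := keyed.foldl (fun d p => d.modify p.1 [] (fun ms => ms ++ [p.2])) PySem.Dict.empty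
  (pvToGroup group1).items.foldl (fun pairs p =>
    let ms := buckets.getD (pvCanon p.2.items atts1) []
    if ms.length == 1 then pairs ++ [(p.1, ms.headD "")] else pairs) []

-- ===== PRECONDITION & SPEC =====
def Spec_determine_matching (criteria1 : List String) (criteria2 : List String) (group1 : List (String × List (String × String))) (group2 : List (String × List (String × String))) (out : List (String × String)) : Prop := out = determine_matching_alt criteria1 criteria2 group1 group2
instance (criteria1 : List String) (criteria2 : List String) (group1 : List (String × List (String × String))) (group2 : List (String × List (String × String))) (out : List (String × String)) : Decidable (Spec_determine_matching criteria1 criteria2 group1 group2 out) := by unfold Spec_determine_matching; infer_instance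

-- ===== CLAIM (what is proved, stated in full; the proofs are below) =====
def Claim_equal_determine_matching : Prop := ∀ (criteria1 : List String) (criteria2 : List String) (group1 : List (String × List (String × String))) (group2 : List (String × List (String × String))), Dom_determine_matching criteria1 criteria2 group1 group2 → Spec_determine_matching criteria1 criteria2 group1 group2 (determine_matching criteria1 criteria2 group1 group2)

-- ===== LEMMAS AND PROOFS =====

-- a skip-or-step foldl is a foldl over the filtered list
theorem pv_foldl_skip_if {β γ : Type} (l : List β) (c : β → Prop) [DecidablePred c] (f : γ → β → γ) (init : γ) :
    l.foldl (fun d x => if c x then d else f d x) init = (l.filter (fun x => !decide (c x))).foldl f init := by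
  induction l generalizing init with
  | nil => rfl
  | cons a t ih =>
    by_cases h : c a <;> simp [h, ih]

-- the items of remove_inherent are the filtered items of its argument
theorem pv_remove_items (v : PySem.Dict String String) (atts : List String) (h : v.keys.Nodup) :
    (remove_inherent v atts).items = v.items.filter (fun q => !decide (q.1 ∈ atts)) := by
  unfold remove_inherent
  rw [pv_foldl_skip_if]
  have hsub : ((v.items.filter (fun q => !decide (q.1 ∈ atts))).map (fun q => q.1)).Sublist (v.items.map (fun q => q.1)) :=
    List.filter_sublist.map _
  have := PySem.Dict.items_foldl_insert_fresh
      (l := v.items.filter (fun q => !decide (q.1 ∈ atts)))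
      (k := fun q => q.1) (v := fun q => q.2) (d := PySem.Dict.empty)
      (by intro a _; simp [PySem.Dict.contains_empty])
      (hsub.nodup h)
  simpa using this

theorem pv_remove_keys_nodup (v : PySem.Dict String String) (atts : List String) (h : v.keys.Nodup) :
    (remove_inherent v atts).keys.Nodup := by
  have : (remove_inherent v atts).keys = (v.items.filter (fun q => !decide (q.1 ∈ atts))).map (fun q => q.1) := by
    simp [PySem.Dict.keys, pv_remove_items v atts h]
  rw [this]
  exact (List.filter_sublist.map _).nodup h

-- the sub-dict loop over fresh keys just maps over the items
theorem pv_sub_items (g : PySem.Dict String (PySem.Dict String String)) (atts : List String) (h : g.keys.Nodup) :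
    (g.items.foldl (fun d p => d.insert p.1 (remove_inherent p.2 atts)) PySem.Dict.empty).items
      = g.items.map (fun p => (p.1, remove_inherent p.2 atts)) := by
  have := PySem.Dict.items_foldl_insert_fresh
      (l := g.items) (k := fun p => p.1) (v := fun p => remove_inherent p.2 atts) (d := PySem.Dict.empty)
      (by intro a _; simp [PySem.Dict.contains_empty]) h
  simpa using this

-- every value in a dict built by a fold of inserts satisfies a predicate its sources satisfy
theorem pv_foldl_insert_snd_pred {κ ν : Type} [BEq κ] [LawfulBEq κ] (P : ν → Prop)
    (l : List (κ × ν)) (d : PySem.Dict κ ν)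
    (hd : ∀ p ∈ d.items, P p.2) (hl : ∀ p ∈ l, P p.2) :
    ∀ p ∈ (l.foldl (fun acc p => acc.insert p.1 p.2) d).items, P p.2 := by
  induction l generalizing d with
  | nil => exact hd
  | cons a t ih =>
    intro p hp
    refine ih (d.insert a.1 a.2) (fun q hq => ?_) (fun q hq => hl q (List.mem_cons_of_mem _ hq)) p hp
    rcases (PySem.Dict.mem_items_insert d a.1 a.2 q).mp hq with h | ⟨h, _⟩
    · subst h; exact hl a (List.mem_cons_self)
    · exact hd q h

theorem pv_toGroup_snd_nodup (g : List (String × List (String × String))) :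
    ∀ p ∈ (pvToGroup g).items, p.2.keys.Nodup := by
  unfold pvToGroup PySem.Dict.ofList PySem.Dict.update
  refine pv_foldl_insert_snd_pred (fun v : PySem.Dict String String => v.keys.Nodup) _ _
    (by intro p hp; exact absurd (show p ∈ ([] : List (String × PySem.Dict String String)) from hp) (by simp)) ?_
  intro p hp
  rcases List.mem_map.mp hp with ⟨q, _, rfl⟩
  exact PySem.Dict.nodup_keys_ofList q.2

-- canonical (name-sorted) item lists coincide exactly when the dicts are equal as maps
theorem pv_canon_eq_iff (d1 d2 : PySem.Dict String String)
    (h1 : d1.keys.Nodup) (h2 : d2.keys.Nodup) :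
    (PySem.List.sorted d1.items (fun q => q.1) false = PySem.List.sorted d2.items (fun q => q.1) false)
      ↔ pvDictEq d1 d2 = true := by
  constructor
  · intro h
    have hperm : d1.items.Perm d2.items :=
      ((PySem.List.sorted_perm d1.items (fun q => q.1) false).symm.trans
        (h ▸ PySem.List.sorted_perm d2.items (fun q => q.1) false))
    simp only [pvDictEq, Bool.and_eq_true, beq_iff_eq, List.all_eq_true]
    refine ⟨by simp [PySem.Dict.size, hperm.length_eq], ?_⟩
    intro q hq
    exact PySem.Dict.get?_of_mem_items d2 (hperm.mem_iff.mp hq) h2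
  · intro h
    simp only [pvDictEq, Bool.and_eq_true, beq_iff_eq, List.all_eq_true] at h
    obtain ⟨hlen, hall⟩ := h
    have hnd1 : d1.items.Nodup := List.Nodup.of_map _ h1
    have hsub : d1.items ⊆ d2.items := fun q hq => by
      have := hall q hq
      have : d2.get? q.1 = some q.2 := this
      have hmem := PySem.Dict.mem_items_of_get?_eq_some d2 this
      simpa using hmem
    have hperm : d1.items.Perm d2.items :=
      (List.subperm_of_subset hnd1 hsub).perm_of_length_le
        (by simp [PySem.Dict.size] at hlen; omega)
    have hysperm : (PySem.List.sorted d2.items (fun q => q.1) false).Perm d1.items :=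
      (PySem.List.sorted_perm d2.items (fun q => q.1) false).trans hperm.symm
    have hle := PySem.List.sorted_pairwise d2.items (fun q => q.1)
    have hndkeys : ((PySem.List.sorted d2.items (fun q => q.1) false).map (fun q => q.1)).Nodup := by
      have : ((PySem.List.sorted d2.items (fun q => q.1) false).map (fun q => q.1)).Perm d2.keys :=
        (PySem.List.sorted_perm d2.items (fun q => q.1) false).map _
      exact this.nodup_iff.mpr h2
    have hne : (PySem.List.sorted d2.items (fun q => q.1) false).Pairwise (fun a b => a.1 ≠ b.1) :=
      List.pairwise_map.mp hndkeys
    have hlt : (PySem.List.sorted d2.items (fun q => q.1) false).Pairwise (fun a b => a.1 < b.1) :=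
      (hle.and hne).imp (fun h => lt_of_le_of_ne h.1 h.2)
    exact PySem.List.sorted_eq_of_perm_of_pairwise_lt d1.items _ (fun q => q.1) hysperm hlt

-- the set-based membership test equals the list-based one
theorem pv_set_contains (atts : List String) (x : String) :
    PySem.Set.contains (PySem.Set.ofList atts) x = decide (x ∈ atts) := by
  by_cases hx : x ∈ atts <;>
    simp [PySem.Set.contains, PySem.Set.mem_ofList, hx]

-- pvCanon is the sorted item list of remove_inherent
theorem pv_canon_remove (v : PySem.Dict String String) (atts : List String) (h : v.keys.Nodup) :
    pvCanon v.items (PySem.Set.ofList atts)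
      = PySem.List.sorted (remove_inherent v atts).items (fun q => q.1) false := by
  unfold pvCanon
  rw [pv_remove_items v atts h]
  congr 1
  exact List.filter_congr (fun q _ => by rw [pv_set_contains])


-- ===== VERDICT (by name: the statement is the Claim_ definition above) =====
theorem determine_matching_spec : Claim_equal_determine_matching := by
  intro c1 c2 gr1 gr2 _hdom
  unfold Spec_determine_matching
  simp only [determine_matching, determine_matching_alt]
  have hg1 : (pvToGroup gr1).keys.Nodup := PySem.Dict.nodup_keys_ofList _
  have hg2 : (pvToGroup gr2).keys.Nodup := PySem.Dict.nodup_keys_ofList _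
  have hv1 := pv_toGroup_snd_nodup gr1
  have hv2 := pv_toGroup_snd_nodup gr2
  set A1 := c1.map pvSplitHead with hA1
  set A2 := c2.map pvSplitHead with hA2
  set g1 := pvToGroup gr1 with hg1def
  set g2 := pvToGroup gr2 with hg2def
  set sub1 := g1.items.foldl (fun d p => d.insert p.1 (remove_inherent p.2 A1)) PySem.Dict.empty with hsub1
  set sub2 := g2.items.foldl (fun d p => d.insert p.1 (remove_inherent p.2 A2)) PySem.Dict.empty with hsub2
  have hs1 : sub1.items = g1.items.map (fun p => (p.1, remove_inherent p.2 A1)) := pv_sub_items g1 A1 hg1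
  have hs2 : sub2.items = g2.items.map (fun p => (p.1, remove_inherent p.2 A2)) := pv_sub_items g2 A2 hg2
  have hk1 : sub1.keys = g1.items.map (fun p => p.1) := by
    simp [PySem.Dict.keys, hs1, List.map_map, Function.comp_def]
  have hk2 : sub2.keys = g2.items.map (fun p => p.1) := by
    simp [PySem.Dict.keys, hs2, List.map_map, Function.comp_def]
  have hk1nd : sub1.keys.Nodup := by
    rw [hk1]; simpa [PySem.Dict.keys] using hg1
  have hk2nd : sub2.keys.Nodup := by
    rw [hk2]; simpa [PySem.Dict.keys] using hg2
  rw [hk1, List.foldl_map]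
  apply PySem.List.foldl_congr_mem
  intro acc p hp
  -- value of sub1 at p.1
  have hW : sub1.getD p.1 PySem.Dict.empty = remove_inherent p.2 A1 := by
    refine PySem.Dict.getD_of_mem_items sub1 ?_ hk1nd _
    rw [hs1]; exact List.mem_map_of_mem hp
  -- A's scan of sub2's keys, as a filter of g2's items
  have hcor : sub2.keys.filter (fun x => pvDictEq (sub2.getD x PySem.Dict.empty) (sub1.getD p.1 PySem.Dict.empty))
      = (g2.items.filter (fun q => pvDictEq (remove_inherent q.2 A2) (remove_inherent p.2 A1))).map (fun q => q.1) := by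
    rw [hk2, List.filter_map]
    congr 1
    apply List.filter_congr
    intro q hq
    have hq2 : sub2.getD q.1 PySem.Dict.empty = remove_inherent q.2 A2 := by
      refine PySem.Dict.getD_of_mem_items sub2 ?_ hk2nd _
      rw [hs2]; exact List.mem_map_of_mem hq
    simp [hq2, hW]
  -- B's bucket lookup, as a filter of g2's items
  have hms : ((g2.items.map (fun q => (pvCanon q.2.items (PySem.Set.ofList A2), q.1))).foldl
        (fun d q => d.modify q.1 [] (fun ms => ms ++ [q.2])) PySem.Dict.empty).getD (pvCanon p.2.items (PySem.Set.ofList A1)) []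
      = (g2.items.filter (fun q => pvCanon q.2.items (PySem.Set.ofList A2) == pvCanon p.2.items (PySem.Set.ofList A1))).map (fun q => q.1) := by
    rw [PySem.Dict.getD_foldl_modify_append, List.filter_map]
    simp [Function.comp_def, List.map_map]
  -- the two filters test the same predicate
  have hpred : ∀ q ∈ g2.items,
      (pvCanon q.2.items (PySem.Set.ofList A2) == pvCanon p.2.items (PySem.Set.ofList A1))
        = pvDictEq (remove_inherent q.2 A2) (remove_inherent p.2 A1) := by
    intro q hq
    rw [pv_canon_remove q.2 A2 (hv2 q hq), pv_canon_remove p.2 A1 (hv1 p hp)]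
    rw [Bool.beq_eq_decide_eq]
    have hiff := pv_canon_eq_iff (remove_inherent q.2 A2) (remove_inherent p.2 A1)
      (pv_remove_keys_nodup _ _ (hv2 q hq)) (pv_remove_keys_nodup _ _ (hv1 p hp))
    simp [hiff]
  rw [hW] at hcor
  rw [hW, hcor, hms, List.filter_congr hpred]
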